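-- pv_equiv track=rewrite | github.com/frechdev/SkeLa | src/dsl/DSLInterpreter.py | tokenize_attributes
-- ===== SOURCE A (Python) =====
-- def tokenize_attributes(attribute_str):
--     tokens = {}
--     current_key = None
--     current_value = []
--     depth = 0
--
--     i = 0
--     while i < len(attribute_str):
--         char = attribute_str[i]
--
--         if char == ':':
--             current_key = ''.join(current_value).strip()
--             current_value = []
--         elif char == ',' and depth == 0:
--             if current_key is not None:
--                 tokens[current_key] = ''.join(current_value).strip()
--                 current_key = None
--             current_value = []
--         elif char == '[':
--             depth += 1
--             current_value.append(char)
--         elif char == ']':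
--             depth -= 1
--             current_value.append(char)
--         elif char == '{' or char == '}':
--             raise SyntaxError(f"'{char}' may not be used within the attribute list (within '{{' '}}')")
--         else:
--             current_value.append(char)
--
--         i += 1
--
--     if current_key is not None:
--         tokens[current_key] = ''.join(current_value).strip()
--
--     return tokens
-- ===== SOURCE B (Python) =====
-- def tokenize_attributes(attribute_str):
--     # Pass 1: cut into segments at depth-0 commas, tracking bracket depth.
--     segments = []
--     cur = []
--     depth = 0
--     for char in attribute_str:
--         if char == '{' or char == '}':
--             raise SyntaxError(f"'{char}' may not be used within the attribute list (within '{{' '}}')")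
--         if char == ',' and depth == 0:
--             segments.append(''.join(cur))
--             cur = []
--         else:
--             if char == '[':
--                 depth += 1
--             elif char == ']':
--                 depth -= 1
--             cur.append(char)
--     segments.append(''.join(cur))
--     # Pass 2: the last two colon-separated parts of a segment are key and value.
--     tokens = {}
--     for seg in segments:
--         parts = seg.split(':')
--         if len(parts) >= 2:
--             tokens[parts[-2].strip()] = parts[-1].strip()
--     return tokens
-- ===== Notes on version B (the rewrite author's own statement) =====
-- stated objective: simpler
-- what changed: A's single character loop juggling current_key/current_value/depth is replaced by two passes: cut the string into segments at depth-0 commas (raising the same SyntaxError on '{'/'}'), then for each segment take the last two ':'-separated parts as key and value. (same O(n); B is measurably faster since ''.join/str.split/strip do the per-segment work in C instead of per-character Python bytecode)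
import Mathlib
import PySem

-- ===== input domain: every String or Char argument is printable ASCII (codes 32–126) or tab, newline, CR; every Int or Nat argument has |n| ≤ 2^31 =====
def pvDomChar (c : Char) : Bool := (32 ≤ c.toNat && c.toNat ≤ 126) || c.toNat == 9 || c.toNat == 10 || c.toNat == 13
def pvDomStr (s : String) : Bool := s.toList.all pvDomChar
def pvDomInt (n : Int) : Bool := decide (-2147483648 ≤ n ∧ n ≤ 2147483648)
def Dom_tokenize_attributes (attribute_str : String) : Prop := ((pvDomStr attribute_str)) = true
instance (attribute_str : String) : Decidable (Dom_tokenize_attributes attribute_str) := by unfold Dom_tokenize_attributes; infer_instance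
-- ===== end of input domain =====

-- B replaces A's single character-by-character state machine (key/value/depth juggled together) by
-- two passes: cut at depth-0 commas, then take the last two ':'-parts of each segment (objective: simpler).

-- ===== PORT A =====
-- A's while loop over the characters; state = (tokens, current_key, current_value, depth).
-- `none` models the SyntaxError raised on '{' / '}' (excluded by Pre_).
def tokAloop (cs : List Char) (tokens : PySem.Dict String String)
    (ck : Option String) (cv : List Char) (depth : Int) :
    Option (PySem.Dict String String) :=
  match cs with
  | [] =>
    some (match ck with
      | some k => tokens.insert k (String.ofList (PySem.Chars.strip cv))
      | none => tokens)
  | c :: rest =>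
    if c = ':' then
      tokAloop rest tokens (some (String.ofList (PySem.Chars.strip cv))) [] depth
    else if c = ',' ∧ depth = 0 then
      tokAloop rest
        (match ck with
          | some k => tokens.insert k (String.ofList (PySem.Chars.strip cv))
          | none => tokens)
        none [] depth
    else if c = '[' then
      tokAloop rest tokens ck (cv ++ [c]) (depth + 1)
    else if c = ']' then
      tokAloop rest tokens ck (cv ++ [c]) (depth - 1)
    else if c = '{' ∨ c = '}' then
      none
    else
      tokAloop rest tokens ck (cv ++ [c]) depth

def tokenize_attributes (attribute_str : String) : List (String × String) :=
  match tokAloop attribute_str.toList PySem.Dict.empty none [] 0 with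
  | some tokens => tokens.items
  | none => []   -- SyntaxError: unreachable under Pre_

-- ===== PORT B =====
-- Pass 1: cut into segments at depth-0 commas; `none` models the SyntaxError on '{' / '}'.
def tokBsegs (cs : List Char) (segs : List (List Char)) (cur : List Char) (depth : Int) :
    Option (List (List Char)) :=
  match cs with
  | [] => some (segs ++ [cur])
  | c :: rest =>
    if c = '{' ∨ c = '}' then none
    else if c = ',' ∧ depth = 0 then tokBsegs rest (segs ++ [cur]) [] depth
    else if c = '[' then tokBsegs rest segs (cur ++ [c]) (depth + 1)
    else if c = ']' then tokBsegs rest segs (cur ++ [c]) (depth - 1)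
    else tokBsegs rest segs (cur ++ [c]) depth

-- Pass 2: one segment; parts[-2] / parts[-1] via PySem.List.pyGetD (in range since 2 ≤ parts.length).
def tokBseg (tokens : PySem.Dict String String) (seg : List Char) : PySem.Dict String String :=
  let parts := PySem.Chars.splitOn seg [':']
  if 2 ≤ parts.length then
    tokens.insert (String.ofList (PySem.Chars.strip (PySem.List.pyGetD parts (-2) [])))
      (String.ofList (PySem.Chars.strip (PySem.List.pyGetD parts (-1) [])))
  else tokens

def tokenize_attributes_alt (attribute_str : String) : List (String × String) :=
  match tokBsegs attribute_str.toList [] [] 0 with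
  | some segs => (segs.foldl tokBseg PySem.Dict.empty).items
  | none => []   -- SyntaxError: unreachable under Pre_

-- ===== PRECONDITION & SPEC =====
-- Pre_ excludes exactly the strings containing '{' or '}', on which the Python A raises SyntaxError.
def Pre_tokenize_attributes (attribute_str : String) : Prop :=
  '{' ∉ attribute_str.toList ∧ '}' ∉ attribute_str.toList
instance (attribute_str : String) : Decidable (Pre_tokenize_attributes attribute_str) := by
  unfold Pre_tokenize_attributes; infer_instance

def pvWitness_tokenize_attributes : String := "color : red , size:[1, 2]"

def Spec_tokenize_attributes (attribute_str : String) (out : List (String × String)) : Prop := out = tokenize_attributes_alt attribute_str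
instance (attribute_str : String) (out : List (String × String)) : Decidable (Spec_tokenize_attributes attribute_str out) := by unfold Spec_tokenize_attributes; infer_instance

-- ===== CLAIM (what is proved, stated in full; the proofs are below) =====
def Claim_equal_tokenize_attributes : Prop := ∀ (attribute_str : String), Dom_tokenize_attributes attribute_str → Pre_tokenize_attributes attribute_str → Spec_tokenize_attributes attribute_str (tokenize_attributes attribute_str)

-- ===== LEMMAS AND PROOFS =====

-- A's in-progress segment, reconstructed: the ':'-separated parts seen so far (ps) and the current part (val).
def pvIc : List (List Char) → List Char → List Char
  | [], val => val
  | p :: ps, val => p ++ ':' :: pvIc ps val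

lemma pvIc_eq_intercalate (ps : List (List Char)) (val : List Char) :
    pvIc ps val = [':'].intercalate (ps ++ [val]) := by
  induction ps with
  | nil => simp [pvIc, List.intercalate]
  | cons p ps ih =>
    have : [':'].intercalate ((p :: ps) ++ [val])
        = p ++ [':'] ++ [':'].intercalate (ps ++ [val]) := by
      cases ps <;> simp [List.intercalate, List.intersperse]
    rw [this, pvIc, ih]; simp

lemma pvIc_append (ps : List (List Char)) (val : List Char) (c : Char) :
    pvIc ps (val ++ [c]) = pvIc ps val ++ [c] := by
  induction ps with
  | nil => simp [pvIc]
  | cons p ps ih => simp [pvIc, ih]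

lemma pvIc_snoc (ps : List (List Char)) (q : List Char) :
    pvIc (ps ++ [q]) [] = pvIc ps q ++ [':'] := by
  induction ps with
  | nil => simp [pvIc]
  | cons p ps ih => simp [pvIc, ih]

-- PySem.Chars.splitOn with the one-character separator ':' is List.splitOn ':'.
lemma pvSplitGo_spec (fuel : Nat) :
    ∀ (l cur : List Char) (acc : List (List Char)), l.length < fuel →
      PySem.Chars.splitOn.go [':'] fuel l cur acc
        = acc.reverse ++ (List.splitOn ':' l).modifyHead (cur.reverse ++ ·) := by
  induction fuel with
  | zero => intro l cur acc h; omega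
  | succ f ih =>
    intro l cur acc h
    cases l with
    | nil => simp [PySem.Chars.splitOn.go, List.splitOn]
    | cons c rest =>
      by_cases hc : c = ':'
      · subst hc
        rw [PySem.Chars.splitOn.go]
        have hpre : List.isPrefixOf [':'] (':' :: rest) = true := by
          simp [List.isPrefixOf]
        rw [if_pos hpre]
        have hdrop : List.drop ([':'] : List Char).length (':' :: rest) = rest := by simp
        rw [hdrop, ih rest [] (cur.reverse :: acc) (by simpa using Nat.lt_of_succ_lt_succ h)]
        have hsp : List.splitOn ':' (':' :: rest) = [] :: List.splitOn ':' rest := by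
          simp [List.splitOn, List.splitOnP_cons]
        rw [hsp]
        simp only [List.reverse_cons, List.append_assoc, List.singleton_append,
          List.modifyHead_cons, List.reverse_nil, List.nil_append, List.append_nil]
        cases List.splitOn ':' rest with
        | nil => rfl
        | cons a as => rfl
      · rw [PySem.Chars.splitOn.go]
        have hpre : List.isPrefixOf [':'] (c :: rest) = false := by
          have hbc : (':' == c) = false := by
            simp only [beq_eq_false_iff_ne, ne_eq]
            exact fun hcc => hc hcc.symm
          simp [List.isPrefixOf, hbc]
        simp only [hpre, Bool.false_eq_true, if_false]
        rw [ih rest (c :: cur) acc (by simpa using Nat.lt_of_succ_lt_succ h)]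
        have : List.splitOn ':' (c :: rest) = (List.splitOn ':' rest).modifyHead (c :: ·) := by
          simp [List.splitOn, List.splitOnP_cons, hc]
        rw [this]
        cases hs : List.splitOn ':' rest with
        | nil => simp
        | cons a as => simp

lemma pvSplitOn_colon (s : List Char) :
    PySem.Chars.splitOn s [':'] = List.splitOn ':' s := by
  rw [PySem.Chars.splitOn, pvSplitGo_spec (s.length + 1) s [] [] (by omega)]
  cases hs : List.splitOn ':' s with
  | nil => simp only [List.reverse_nil, List.nil_append, List.modifyHead_nil]
  | cons a as => simp only [List.reverse_nil, List.nil_append, List.modifyHead_cons]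

lemma pvSplit_pvIc (ps : List (List Char)) (val : List Char)
    (hps : ∀ p ∈ ps, ':' ∉ p) (hval : ':' ∉ val) :
    PySem.Chars.splitOn (pvIc ps val) [':'] = ps ++ [val] := by
  rw [pvSplitOn_colon, pvIc_eq_intercalate]
  exact List.splitOn_intercalate (ps ++ [val]) ':'
    (by intro l hl
        rcases List.mem_append.1 hl with h | h
        · exact hps l h
        · rw [List.mem_singleton.1 h]; exact hval)
    (by simp)

lemma pvGetD_pair {α : Type} (xs : List α) (a b : α) (d : α) :
    PySem.List.pyGetD (xs ++ [a, b]) (-2) d = a := by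
  rw [PySem.List.pyGetD_neg_ofNat (xs ++ [a, b]) 2 d (by omega) (by simp)]
  simp

-- One segment of B computes exactly A's "flush current key/value" step.
lemma pvTokBseg_ic (t : PySem.Dict String String) (ps : List (List Char)) (val : List Char)
    (hps : ∀ p ∈ ps, ':' ∉ p) (hval : ':' ∉ val) :
    tokBseg t (pvIc ps val)
      = (match ps.getLast?.map (fun p => String.ofList (PySem.Chars.strip p)) with
          | some k => t.insert k (String.ofList (PySem.Chars.strip val))
          | none => t) := by
  unfold tokBseg
  rw [pvSplit_pvIc ps val hps hval]
  cases hp : ps.getLast? with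
  | none =>
    have : ps = [] := List.getLast?_eq_none_iff.1 hp
    subst this; simp
  | some q =>
    obtain ⟨qs, rfl⟩ : ∃ qs, ps = qs ++ [q] := by
      cases ps using List.reverseRecOn with
      | nil => simp at hp
      | append_singleton qs x =>
        refine ⟨qs, ?_⟩
        have hx : x = q := by simpa using hp
        rw [hx]
    have h2 : 2 ≤ ((qs ++ [q]) ++ [val]).length := by simp
    rw [if_pos h2]
    have e1 : (qs ++ [q]) ++ [val] = qs ++ [q, val] := by simp
    rw [e1, pvGetD_pair]
    have e2 : PySem.List.pyGetD (qs ++ [q, val]) (-1) [] = val := by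
      have : qs ++ [q, val] = (qs ++ [q]) ++ [val] := by simp
      rw [this, PySem.List.pyGetD_neg_one_append_singleton]
    rw [e2]
    simp

-- The segment accumulator of B's first pass only ever gets appended to.
lemma pvTokBsegs_append (cs : List Char) :
    ∀ (segs : List (List Char)) (cur : List Char) (d : Int),
      tokBsegs cs segs cur d = (tokBsegs cs [] cur d).map (segs ++ ·) := by
  induction cs with
  | nil => intro segs cur d; simp [tokBsegs]
  | cons c rest ih =>
    intro segs cur d
    rw [tokBsegs, tokBsegs]
    split_ifs with h1 h2 h3 h4
    · rfl
    · simp only [List.nil_append]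
      rw [ih (segs ++ [cur]) [] d, ih [cur] [] d, Option.map_map]
      congr 1
      funext x
      simp
    · exact ih segs (cur ++ [c]) (d + 1)
    · exact ih segs (cur ++ [c]) (d - 1)
    · exact ih segs (cur ++ [c]) d

-- Main invariant: A's machine, started with the pending parts (ps, val) of the current segment,
-- computes what B computes on the remaining characters.
lemma pvMain (cs : List Char) :
    ∀ (t : PySem.Dict String String) (ps : List (List Char)) (val : List Char) (d : Int),
      (∀ p ∈ ps, ':' ∉ p) → ':' ∉ val →
      tokAloop cs t (ps.getLast?.map (fun p => String.ofList (PySem.Chars.strip p))) val d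
        = (tokBsegs cs [] (pvIc ps val) d).map (fun ss => ss.foldl tokBseg t) := by
  induction cs with
  | nil =>
    intro t ps val d hps hval
    simp only [tokAloop, tokBsegs, Option.map_some, List.nil_append, List.foldl_cons,
      List.foldl_nil]
    rw [pvTokBseg_ic t ps val hps hval]
  | cons c rest ih =>
    intro t ps val d hps hval
    simp only [tokAloop, tokBsegs]
    by_cases hcolon : c = ':'
    · subst hcolon
      rw [if_pos rfl, if_neg (by simp), if_neg (by simp), if_neg (by decide),
        if_neg (by decide)]
      have hkey : (some (String.ofList (PySem.Chars.strip val)))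
          = (ps ++ [val]).getLast?.map (fun p => String.ofList (PySem.Chars.strip p)) := by simp
      rw [hkey, ih t (ps ++ [val]) [] d
        (by intro p hp; rcases List.mem_append.1 hp with h | h
            · exact hps p h
            · simpa using (List.mem_singleton.1 h) ▸ hval)
        (by simp), pvIc_snoc]
    · by_cases hbrace : c = '{' ∨ c = '}'
      · rcases hbrace with rfl | rfl <;>
          · rw [if_neg hcolon, if_neg (by simp), if_neg (by decide), if_neg (by decide),
              if_pos (by decide), if_pos (by decide)]
            rfl
      · by_cases hcomma : c = ',' ∧ d = 0
        · rw [if_neg hcolon, if_pos hcomma, if_neg hbrace, if_pos hcomma]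
          rw [← pvTokBseg_ic t ps val hps hval]
          have hih := ih (tokBseg t (pvIc ps val)) [] [] d (by simp) (by simp)
          simp only [List.getLast?_nil, Option.map_none, pvIc] at hih
          rw [hih]
          simp only [List.nil_append]
          rw [pvTokBsegs_append rest [pvIc ps val] [] d, Option.map_map]
          congr 1
        · by_cases hlb : c = '['
          · subst hlb
            rw [if_neg hcolon, if_neg hcomma, if_pos rfl, if_neg (by decide), if_neg hcomma,
              if_pos rfl]
            rw [ih t ps (val ++ ['[']) (d + 1) hps (by simp [List.mem_append, hval]),
              pvIc_append]
          · by_cases hrb : c = ']'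
            · subst hrb
              rw [if_neg hcolon, if_neg hcomma, if_neg (by decide), if_pos rfl,
                if_neg (by decide), if_neg hcomma, if_neg (by decide), if_pos rfl]
              rw [ih t ps (val ++ [']']) (d - 1) hps (by simp [List.mem_append, hval]),
                pvIc_append]
            · rw [if_neg hcolon, if_neg hcomma, if_neg hlb, if_neg hrb, if_neg hbrace,
                if_neg hbrace, if_neg hcomma, if_neg hlb, if_neg hrb]
              rw [ih t ps (val ++ [c]) d hps
                (by intro hmem
                    rcases List.mem_append.1 hmem with h | h
                    · exact hval h
                    · exact hcolon (List.mem_singleton.1 h).symm), pvIc_append]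

-- ===== VERDICT (by name: the statement is the Claim_ definition above) =====
theorem tokenize_attributes_spec : Claim_equal_tokenize_attributes := by
  intro s _ _
  unfold Spec_tokenize_attributes tokenize_attributes tokenize_attributes_alt
  have h := pvMain s.toList PySem.Dict.empty [] [] 0 (by simp) (by simp)
  simp only [List.getLast?_nil, Option.map_none, pvIc] at h
  rw [h]
  cases tokBsegs s.toList [] [] 0 <;> simp
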